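-- pv_equiv track=rewrite | github.com/luizadelnegro/PUC-INF1026-Computa-o-Aplicada | tarefa 1/TURMA_A_VALIDACAO_T01_Luiza_Fernandes_1721251.py | agrupaEntradasPorVinhosEscolhidos
-- ===== SOURCE A (Python) =====
-- def agrupaEntradasPorVinhosEscolhidos (tupla_entrada_vinhos, lista_vinhos):
--     dicionario_vinhos=dict()
--     for vinho in lista_vinhos:
--         dicionario_vinhos[vinho]=[]
--
--     for el in tupla_entrada_vinhos:
--         for vinho in el[1]:
--             if vinho in dicionario_vinhos.keys():
--                 dicionario_vinhos[vinho].append(el[0])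
--     return dicionario_vinhos
-- ===== SOURCE B (Python) =====
-- def agrupaEntradasPorVinhosEscolhidos(tupla_entrada_vinhos, lista_vinhos):
--     return {vinho: [el[0] for el in tupla_entrada_vinhos for v in el[1] if v == vinho]
--             for vinho in lista_vinhos}
-- ===== Notes on version B (the rewrite author's own statement) =====
-- stated objective: simpler
-- what changed: Replaces the two-phase dict mutation (pre-seed keys, then a forward pass appending ids under a membership guard) by a single dict comprehension that, per wine, collects all matching entry ids in one inverted-nesting scan.
import Mathlib
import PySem

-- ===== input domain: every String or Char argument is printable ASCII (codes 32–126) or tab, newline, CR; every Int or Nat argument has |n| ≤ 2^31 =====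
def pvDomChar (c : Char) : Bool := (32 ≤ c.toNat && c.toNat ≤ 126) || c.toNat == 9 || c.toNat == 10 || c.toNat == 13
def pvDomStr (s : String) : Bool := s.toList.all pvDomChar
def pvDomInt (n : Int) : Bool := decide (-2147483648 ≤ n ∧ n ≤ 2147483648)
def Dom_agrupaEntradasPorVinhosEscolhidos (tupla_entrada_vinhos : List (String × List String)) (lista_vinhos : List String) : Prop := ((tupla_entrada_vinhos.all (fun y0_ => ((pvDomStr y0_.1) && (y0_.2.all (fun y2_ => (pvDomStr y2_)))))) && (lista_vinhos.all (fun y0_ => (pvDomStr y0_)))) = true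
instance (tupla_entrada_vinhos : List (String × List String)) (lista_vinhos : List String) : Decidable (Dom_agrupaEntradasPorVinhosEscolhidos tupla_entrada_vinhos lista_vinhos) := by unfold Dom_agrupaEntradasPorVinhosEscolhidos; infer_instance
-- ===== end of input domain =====

-- B replaces A's two-phase dict mutation by a per-wine dict comprehension (inverted loop nesting); objective: simpler.

-- ===== PORT A =====
def agrupaEntradasPorVinhosEscolhidos (tupla_entrada_vinhos : List (String × List String)) (lista_vinhos : List String) : List (String × List String) :=
  let d0 : PySem.Dict String (List String) :=
    lista_vinhos.foldl (fun d vinho => d.insert vinho []) PySem.Dict.empty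
  let d :=
    tupla_entrada_vinhos.foldl (fun d el =>
      el.2.foldl (fun d vinho =>
        if d.contains vinho then d.modify vinho [] (fun xs => xs ++ [el.1]) else d) d) d0
  d.items

-- ===== PORT B =====
-- the inner comprehension [el[0] for el in tupla for v in el[1] if v == vinho]
def pvCollect (tupla_entrada_vinhos : List (String × List String)) (vinho : String) : List String :=
  tupla_entrada_vinhos.flatMap (fun el => (el.2.filter (fun v => v == vinho)).map (fun _ => el.1))

def agrupaEntradasPorVinhosEscolhidos_alt (tupla_entrada_vinhos : List (String × List String)) (lista_vinhos : List String) : List (String × List String) :=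
  (lista_vinhos.foldl (fun d vinho => d.insert vinho (pvCollect tupla_entrada_vinhos vinho))
    (PySem.Dict.empty : PySem.Dict String (List String))).items

-- ===== PRECONDITION & SPEC =====
def Spec_agrupaEntradasPorVinhosEscolhidos (tupla_entrada_vinhos : List (String × List String)) (lista_vinhos : List String) (out : List (String × List String)) : Prop := out = agrupaEntradasPorVinhosEscolhidos_alt tupla_entrada_vinhos lista_vinhos
instance (tupla_entrada_vinhos : List (String × List String)) (lista_vinhos : List String) (out : List (String × List String)) : Decidable (Spec_agrupaEntradasPorVinhosEscolhidos tupla_entrada_vinhos lista_vinhos out) := by unfold Spec_agrupaEntradasPorVinhosEscolhidos; infer_instance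

-- ===== CLAIM (what is proved, stated in full; the proofs are below) =====
def Claim_equal_agrupaEntradasPorVinhosEscolhidos : Prop := ∀ (tupla_entrada_vinhos : List (String × List String)) (lista_vinhos : List String), Dom_agrupaEntradasPorVinhosEscolhidos tupla_entrada_vinhos lista_vinhos → Spec_agrupaEntradasPorVinhosEscolhidos tupla_entrada_vinhos lista_vinhos (agrupaEntradasPorVinhosEscolhidos tupla_entrada_vinhos lista_vinhos)

-- ===== LEMMAS AND PROOFS =====

-- keys of a foldl-insert with values depending only on the key
theorem pv_keys_foldl_ins {ν : Type} (l : List String) (g : String → ν) (d : PySem.Dict String ν) :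
    (l.foldl (fun d v => d.insert v (g v)) d).keys = PySem.Set.update d.keys l :=
  PySem.Dict.keys_foldl_insert l (fun _ v => g v) d

-- getD after a foldl-insert with key-only values
theorem pv_getD_foldl_ins {ν : Type} (l : List String) (g : String → ν) (d : PySem.Dict String ν)
    (k : String) (d0 : ν) :
    (l.foldl (fun d v => d.insert v (g v)) d).getD k d0 = if k ∈ l then g k else d.getD k d0 := by
  induction l generalizing d with
  | nil => simp
  | cons v rest ih =>
    simp only [List.foldl_cons, ih, PySem.Dict.getD_insert, List.mem_cons]
    by_cases hk : k ∈ rest <;> by_cases hv : k = v <;> simp [hk, hv]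

-- A's inner loop (over one entry's wine list) keeps the key set
theorem pv_keys_inner (l : List String) (id : String) (d : PySem.Dict String (List String)) :
    (l.foldl (fun d vinho =>
      if d.contains vinho then d.modify vinho [] (fun xs => xs ++ [id]) else d) d).keys = d.keys := by
  induction l generalizing d with
  | nil => rfl
  | cons v rest ih =>
    simp only [List.foldl_cons]
    by_cases hc : d.contains v = true
    · rw [if_pos hc, ih, PySem.Dict.keys_modify, PySem.Dict.keys_insert_of_contains _ _ hc]
    · rw [if_neg hc, ih]

-- A's inner loop: value at a present key grows by one id per matching occurrence
theorem pv_getD_inner (l : List String) (id : String) (d : PySem.Dict String (List String))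
    (k : String) (hk : d.contains k = true) :
    (l.foldl (fun d vinho =>
      if d.contains vinho then d.modify vinho [] (fun xs => xs ++ [id]) else d) d).getD k []
      = d.getD k [] ++ (l.filter (fun v => v == k)).map (fun _ => id) := by
  induction l generalizing d with
  | nil => simp
  | cons v rest ih =>
    simp only [List.foldl_cons, List.filter_cons]
    by_cases hc : d.contains v = true
    · rw [if_pos hc]
      have hk' : (d.modify v [] (fun xs => xs ++ [id])).contains k = true := by
        rw [PySem.Dict.contains_modify]; simp [hk]
      rw [ih _ hk', PySem.Dict.getD_modify]
      by_cases hv : v = k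
      · subst hv; simp
      · have hkv : ¬ (k = v) := fun h => hv h.symm
        simp [hv, hkv]
    · rw [if_neg hc, ih _ hk]
      have hvk : v ≠ k := fun h => hc (h ▸ hk)
      simp [hvk]

-- A's outer loop keeps the key set
theorem pv_keys_outer (t : List (String × List String)) (d : PySem.Dict String (List String)) :
    (t.foldl (fun d el =>
      el.2.foldl (fun d vinho =>
        if d.contains vinho then d.modify vinho [] (fun xs => xs ++ [el.1]) else d) d) d).keys = d.keys := by
  induction t generalizing d with
  | nil => rfl
  | cons el rest ih => simp only [List.foldl_cons]; rw [ih, pv_keys_inner]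

-- contains is preserved too
theorem pv_contains_of_keys_eq (d d' : PySem.Dict String (List String)) (h : d'.keys = d.keys)
    (k : String) : d'.contains k = d.contains k := by
  rw [PySem.Dict.contains_eq_decide_mem_keys, PySem.Dict.contains_eq_decide_mem_keys, h]

-- A's outer loop: value at a present key = old value ++ collected ids
theorem pv_getD_outer (t : List (String × List String)) (d : PySem.Dict String (List String))
    (k : String) (hk : d.contains k = true) :
    (t.foldl (fun d el =>
      el.2.foldl (fun d vinho =>
        if d.contains vinho then d.modify vinho [] (fun xs => xs ++ [el.1]) else d) d) d).getD k []
      = d.getD k [] ++ pvCollect t k := by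
  induction t generalizing d with
  | nil => simp [pvCollect]
  | cons el rest ih =>
    simp only [List.foldl_cons]
    have hkeys := pv_keys_inner el.2 el.1 d
    have hk' : (el.2.foldl (fun d vinho =>
        if d.contains vinho then d.modify vinho [] (fun xs => xs ++ [el.1]) else d) d).contains k = true := by
      rw [pv_contains_of_keys_eq _ _ hkeys]; exact hk
    rw [ih _ hk', pv_getD_inner _ _ _ _ hk]
    simp [pvCollect, List.flatMap_cons, List.append_assoc]

-- ===== VERDICT (by name: the statement is the Claim_ definition above) =====
theorem agrupaEntradasPorVinhosEscolhidos_spec : Claim_equal_agrupaEntradasPorVinhosEscolhidos := by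
  intro t l _
  unfold Spec_agrupaEntradasPorVinhosEscolhidos
  unfold agrupaEntradasPorVinhosEscolhidos agrupaEntradasPorVinhosEscolhidos_alt
  simp only []
  set d0 : PySem.Dict String (List String) :=
    l.foldl (fun d vinho => d.insert vinho []) PySem.Dict.empty with hd0
  set dB : PySem.Dict String (List String) :=
    l.foldl (fun d vinho => d.insert vinho (pvCollect t vinho)) PySem.Dict.empty with hdB
  set dA := t.foldl (fun d el =>
      el.2.foldl (fun d vinho =>
        if d.contains vinho then d.modify vinho [] (fun xs => xs ++ [el.1]) else d) d) d0 with hdA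
  have hkeys0 : d0.keys = PySem.Set.ofList l := by
    rw [hd0, pv_keys_foldl_ins l (fun _ => []), PySem.Dict.keys_empty, PySem.Set.update_nil_left]
  have hkeysB : dB.keys = PySem.Set.ofList l := by
    rw [hdB, pv_keys_foldl_ins l (pvCollect t), PySem.Dict.keys_empty, PySem.Set.update_nil_left]
  have hkeysA : dA.keys = PySem.Set.ofList l := by rw [hdA, pv_keys_outer, hkeys0]
  have hndA : dA.keys.Nodup := by rw [hkeysA]; exact PySem.Set.nodup_ofList l
  have hndB : dB.keys.Nodup := by rw [hkeysB]; exact PySem.Set.nodup_ofList l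
  rw [PySem.Dict.items_eq_map_keys dA hndA [], PySem.Dict.items_eq_map_keys dB hndB [],
    hkeysA, hkeysB]
  apply List.map_congr_left
  intro k hk
  have hkl : k ∈ l := (PySem.Set.mem_ofList l k).mp hk
  have hc0 : d0.contains k = true := by
    rw [PySem.Dict.contains_eq_decide_mem_keys, hkeys0]
    simp [(PySem.Set.mem_ofList l k).mpr hkl]
  have hA : dA.getD k [] = pvCollect t k := by
    rw [hdA, pv_getD_outer t d0 k hc0, hd0, pv_getD_foldl_ins l (fun _ => [])]
    simp [hkl]
  have hB : dB.getD k [] = pvCollect t k := by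
    rw [hdB, pv_getD_foldl_ins l (pvCollect t)]; simp [hkl]
  rw [hA, hB]
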